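-- pv_equiv track=rewrite | github.com/findingsimple/skills | support-routing-audit/report.py | _summarise_path
-- ===== SOURCE A (Python) =====
-- def _summarise_path(transitions):
--     """Render a transitions list as 'A → B → C', collapsing empty 'from' to
--     '(unrouted)' on the first hop only."""
--     if not transitions:
--         return ""
--     nodes = []
--     for tr in transitions:
--         fr = (tr.get("from") or "").strip()
--         to = (tr.get("to") or "").strip()
--         if not nodes:
--             nodes.append(fr or "(unrouted)")
--         if to and nodes[-1] != to:
--             nodes.append(to)
--     return " → ".join(nodes)
-- ===== SOURCE B (Python) =====
-- def _summarise_path(transitions):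
--     if not transitions:
--         return ""
--     first = (transitions[0].get("from") or "").strip() or "(unrouted)"
--     candidates = [first] + [
--         to for tr in transitions if (to := (tr.get("to") or "").strip())
--     ]
--     collapsed = [first] + [b for a, b in zip(candidates, candidates[1:]) if b != a]
--     return " → ".join(collapsed)
-- ===== Notes on version B (the rewrite author's own statement) =====
-- stated objective: alternative
-- what changed: A's single fused loop that mutates a nodes list (first-hop sentinel, empty-to filter and adjacent-duplicate check interleaved via nodes[-1]) is split into two stateless phases: build the candidate sequence with one comprehension, then collapse adjacent duplicates by zipping the sequence with its own tail.
import Mathlib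
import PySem

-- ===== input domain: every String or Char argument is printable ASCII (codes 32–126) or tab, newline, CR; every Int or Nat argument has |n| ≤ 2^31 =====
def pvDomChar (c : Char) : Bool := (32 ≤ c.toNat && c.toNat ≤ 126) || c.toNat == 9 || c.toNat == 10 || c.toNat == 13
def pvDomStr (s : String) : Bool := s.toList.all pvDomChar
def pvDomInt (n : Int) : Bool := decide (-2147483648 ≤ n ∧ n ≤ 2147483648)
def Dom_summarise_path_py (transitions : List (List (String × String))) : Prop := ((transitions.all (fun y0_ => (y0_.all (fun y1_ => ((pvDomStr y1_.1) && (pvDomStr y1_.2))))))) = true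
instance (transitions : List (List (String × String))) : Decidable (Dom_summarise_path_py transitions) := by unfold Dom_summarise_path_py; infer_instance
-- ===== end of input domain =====

-- B replaces A's single stateful loop by a build-candidates phase (one comprehension) and a
-- separate adjacent-duplicate collapse over zipped neighbour pairs (objective: simpler decomposition).

-- (tr.get(k) or "").strip() — shared by both sources verbatim
def pvField (tr : List (String × String)) (k : String) : String :=
  PySem.Str.strip ((PySem.Dict.mk tr).getD k "")

-- ===== PORT A =====
def summarise_path_py (transitions : List (List (String × String))) : String :=
  if transitions = [] then ""
  else
    let nodes := transitions.foldl (fun nodes tr =>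
      let fr := pvField tr "from"
      let tov := pvField tr "to"
      let nodes := if nodes.isEmpty then
          nodes ++ [if fr = "" then "(unrouted)" else fr]
        else nodes
      if tov ≠ "" ∧ nodes.getLast? ≠ some tov then nodes ++ [tov] else nodes) []
    PySem.Str.join " → " nodes

-- ===== PORT B =====
def summarise_path_py_alt (transitions : List (List (String × String))) : String :=
  match transitions with
  | [] => ""
  | tr0 :: _ =>
    let first := if pvField tr0 "from" = "" then "(unrouted)" else pvField tr0 "from"
    let candidates := first :: transitions.filterMap (fun tr =>
      let tov := pvField tr "to"
      if tov = "" then none else some tov)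
    let collapsed := first :: (candidates.zip (PySem.List.slice candidates (some 1) none)).filterMap
      (fun p => if p.2 ≠ p.1 then some p.2 else none)
    PySem.Str.join " → " collapsed

-- ===== PRECONDITION & SPEC =====
def Spec_summarise_path_py (transitions : List (List (String × String))) (out : String) : Prop := out = summarise_path_py_alt transitions
instance (transitions : List (List (String × String))) (out : String) : Decidable (Spec_summarise_path_py transitions out) := by unfold Spec_summarise_path_py; infer_instance

-- ===== CLAIM (what is proved, stated in full; the proofs are below) =====
def Claim_equal_summarise_path_py : Prop := ∀ (transitions : List (List (String × String))), Dom_summarise_path_py transitions → Spec_summarise_path_py transitions (summarise_path_py transitions)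

-- ===== LEMMAS AND PROOFS =====

-- proof-side characterisation of "adjacent-duplicate collapse after x"
def pvG (x : String) : List String → List String
  | [] => []
  | t :: ts => if t = x then pvG x ts else t :: pvG t ts

def pvStepA (nodes : List String) (tr : List (String × String)) : List String :=
  let fr := pvField tr "from"
  let tov := pvField tr "to"
  let nodes := if nodes.isEmpty then
      nodes ++ [if fr = "" then "(unrouted)" else fr]
    else nodes
  if tov ≠ "" ∧ nodes.getLast? ≠ some tov then nodes ++ [tov] else nodes

def pvTos (trs : List (List (String × String))) : List String :=
  trs.filterMap (fun tr =>
    let tov := pvField tr "to"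
    if tov = "" then none else some tov)

lemma pvZip_collapse (x : String) (ts : List String) :
    ((x :: ts).zip ts).filterMap (fun p => if p.2 ≠ p.1 then some p.2 else none) = pvG x ts := by
  induction ts generalizing x with
  | nil => rfl
  | cons t ts ih =>
    simp only [List.zip_cons_cons, List.filterMap_cons, pvG]
    by_cases h : t = x
    · simp only [h]
      simp
      simpa using ih x
    · simp [h]
      simpa using ih t

lemma pvFoldA (trs : List (List (String × String))) (ns : List String) (x : String)
    (hx : ns.getLast? = some x) :
    trs.foldl pvStepA ns = ns ++ pvG x (pvTos trs) := by
  induction trs generalizing ns x with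
  | nil => simp [pvTos, pvG]
  | cons tr trs ih =>
    have hne : ns ≠ [] := by intro h; simp [h] at hx
    have hstep : pvStepA ns tr =
        if pvField tr "to" ≠ "" ∧ ns.getLast? ≠ some (pvField tr "to")
        then ns ++ [pvField tr "to"] else ns := by
      simp [pvStepA, List.isEmpty_iff, hne]
    by_cases hto : pvField tr "to" = ""
    · have : pvStepA ns tr = ns := by simp [hstep, hto]
      simp only [List.foldl_cons, this, pvTos, List.filterMap_cons, hto]
      exact ih ns x hx
    · have htos : pvTos (tr :: trs) = pvField tr "to" :: pvTos trs := by
        simp [pvTos, hto]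
      by_cases heq : pvField tr "to" = x
      · have : pvStepA ns tr = ns := by simp [hstep, hx, heq]
        simp only [List.foldl_cons, this, htos, pvG, if_pos heq]
        exact ih ns x hx
      · have : pvStepA ns tr = ns ++ [pvField tr "to"] := by
          simp only [hstep, hx]
          rw [if_pos]
          exact ⟨hto, by simpa using fun h => heq h.symm⟩
        simp only [List.foldl_cons, this, htos, pvG, if_neg heq]
        rw [ih (ns ++ [pvField tr "to"]) (pvField tr "to") (by simp)]
        simp

-- ===== VERDICT (by name: the statement is the Claim_ definition above) =====
theorem summarise_path_py_spec : Claim_equal_summarise_path_py := by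
  intro transitions _
  unfold Spec_summarise_path_py summarise_path_py summarise_path_py_alt
  match transitions with
  | [] => rfl
  | tr0 :: rest =>
    simp only [if_neg (List.cons_ne_nil tr0 rest)]
    set first := if pvField tr0 "from" = "" then "(unrouted)" else pvField tr0 "from" with hfirst
    have hslice : ∀ (l : List String), PySem.List.slice l (some 1) none = l.drop 1 := by
      intro l; simp [PySem.List.slice_from]
    congr 1
    -- list equality: A's fold = first :: collapsed tail
    have hzip : ∀ ts : List String,
        ((first :: ts).zip (PySem.List.slice (first :: ts) (some 1) none)).filterMap
          (fun p => if p.2 ≠ p.1 then some p.2 else none) = pvG first ts := by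
      intro ts; rw [hslice]; simpa using pvZip_collapse first ts
    rw [hzip]
    show ((tr0 :: rest).foldl pvStepA []) = first :: pvG first (pvTos (tr0 :: rest))
    have hstep0 : pvStepA [] tr0 =
        if pvField tr0 "to" ≠ "" ∧ first ≠ pvField tr0 "to"
        then [first, pvField tr0 "to"] else [first] := by
      simp [pvStepA, ← hfirst]
    by_cases hto : pvField tr0 "to" = ""
    · have h0 : pvStepA [] tr0 = [first] := by simp [hstep0, hto]
      have htos : pvTos (tr0 :: rest) = pvTos rest := by simp [pvTos, hto]
      rw [List.foldl_cons, h0, htos, pvFoldA rest [first] first (by simp)]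
      simp
    · have htos : pvTos (tr0 :: rest) = pvField tr0 "to" :: pvTos rest := by
        simp [pvTos, hto]
      by_cases heq : pvField tr0 "to" = first
      · have h0 : pvStepA [] tr0 = [first] := by simp [hstep0, heq]
        rw [List.foldl_cons, h0, htos, pvFoldA rest [first] first (by simp)]
        simp [pvG, heq]
      · have h0 : pvStepA [] tr0 = [first, pvField tr0 "to"] := by
          rw [hstep0, if_pos ⟨hto, fun h => heq h.symm⟩]
        rw [List.foldl_cons, h0, htos,
          pvFoldA rest [first, pvField tr0 "to"] (pvField tr0 "to") (by simp)]
        simp [pvG, heq]
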